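-- pv_equiv track=rewrite | github.com/mrayva/secids | tools/generate_iso3166_country_header.py | enum_name
-- ===== SOURCE A (Python) =====
-- def enum_name(label: str) -> str:
--     if not label:
--         return 'unspecified'
--     out = []
--     prev_underscore = False
--     for ch in label.lower():
--         if ch.isalnum():
--             out.append(ch)
--             prev_underscore = False
--         else:
--             if not prev_underscore:
--                 out.append('_')
--                 prev_underscore = True
--     name = ''.join(out).strip('_')
--     if not name:
--         return 'unspecified'
--     if name[0].isdigit():
--         name = '_' + name
--     return name
-- ===== SOURCE B (Python) =====
-- def enum_name(label: str) -> str: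
--     # Staged passes: blank out every non-alphanumeric of the lowered label,
--     # then whitespace-split (collapsing runs) and underscore-join the words.
--     name = '_'.join(''.join(ch if ch.isalnum() else ' ' for ch in label.lower()).split())
--     if not name:
--         return 'unspecified'
--     if name[0].isdigit():
--         name = '_' + name
--     return name
-- ===== Notes on version B (the rewrite author's own statement) =====
-- stated objective: simpler
-- what changed: Replaces A's character-by-character prev_underscore state machine plus a final edge-strip with staged whole-string passes: map every non-alphanumeric of the lowered label to a space, then use str.split() to extract the words and join them with underscores, so no collapsing/stripping bookkeeping exists at all.
import Mathlib
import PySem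

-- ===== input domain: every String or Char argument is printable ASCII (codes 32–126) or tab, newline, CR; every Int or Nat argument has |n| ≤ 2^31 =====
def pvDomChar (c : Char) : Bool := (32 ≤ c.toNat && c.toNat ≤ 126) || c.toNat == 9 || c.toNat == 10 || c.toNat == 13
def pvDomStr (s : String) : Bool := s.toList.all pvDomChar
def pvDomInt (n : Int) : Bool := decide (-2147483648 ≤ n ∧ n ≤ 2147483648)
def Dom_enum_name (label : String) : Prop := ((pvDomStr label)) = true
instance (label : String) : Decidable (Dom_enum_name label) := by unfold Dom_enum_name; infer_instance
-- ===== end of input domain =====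

-- B replaces A's prev_underscore state machine plus strip('_') by staged whole-string passes:
-- blank out every non-alphanumeric, whitespace-split, underscore-join (objective: simpler).

-- ===== PORT A =====
-- literal transliteration of A: state machine over label.lower() with state (out, prev_underscore),
-- then ''.join(out).strip('_'); name[0] on the guard-protected nonempty name is List.headI.
def enum_name (label : String) : String :=
  if label = "" then "unspecified" else
  let st := (PySem.Str.lower label).toList.foldl
    (fun (st : List Char × Bool) ch =>
      if PySem.Chars.isalnum ch then (st.1 ++ [ch], false)
      else if !st.2 then (st.1 ++ ['_'], true) else st)
    ([], false)
  let name := PySem.Chars.stripChars st.1 ['_']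
  if name = [] then "unspecified" else
  let name := if PySem.Chars.isdigit name.headI then '_' :: name else name
  String.ofList name

-- ===== PORT B =====
-- literal transliteration of Source B: map each char of label.lower() to itself if alnum else ' ',
-- split() the result (PySem.Chars.split₀), '_'.join the words; same guards as Source B.
def enum_name_alt (label : String) : String :=
  let spaced := (PySem.Str.lower label).toList.map
    (fun ch => if PySem.Chars.isalnum ch then ch else ' ')
  let name := PySem.Chars.join ['_'] (PySem.Chars.split₀ spaced)
  if name = [] then "unspecified" else
  if PySem.Chars.isdigit name.headI then String.ofList ('_' :: name)
  else String.ofList name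

-- ===== PRECONDITION & SPEC =====
def Spec_enum_name (label : String) (out : String) : Prop := out = enum_name_alt label
instance (label : String) (out : String) : Decidable (Spec_enum_name label out) := by unfold Spec_enum_name; infer_instance

-- ===== CLAIM (what is proved, stated in full; the proofs are below) =====
def Claim_equal_enum_name : Prop := ∀ (label : String), Dom_enum_name label → Spec_enum_name label (enum_name label)

-- ===== LEMMAS AND PROOFS =====

-- proof-side name for A's fold step (definitionally the lambda in the port)
def pvStepA (st : List Char × Bool) (ch : Char) : List Char × Bool :=
  if PySem.Chars.isalnum ch then (st.1 ++ [ch], false)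
  else if !st.2 then (st.1 ++ ['_'], true) else st

-- proof-side tokenizer fold: (tokens so far, current alnum run)
def pvStepB (st : List (List Char) × List Char) (ch : Char) : List (List Char) × List Char :=
  if PySem.Chars.isalnum ch then (st.1, st.2 ++ [ch])
  else if st.2 ≠ [] then (st.1 ++ [st.2], []) else st

-- B's char map
def pvBlank (ch : Char) : Char := if PySem.Chars.isalnum ch then ch else ' '

-- the trailing pieces of A's out-string as determined by the tokenizer state
def pvTail (prev : Bool) (cur : List Char) : List (List Char) :=
  if cur ≠ [] then [cur] else if prev then [[]] else []

-- the invariant linking A's fold state to the tokenizer state (l: a leading '_' was emitted)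
def pvLink (l : Bool) (stA : List Char × Bool) (stB : List (List Char) × List Char) : Prop :=
  stA.1 = PySem.Chars.join ['_'] ((cond l [[]] []) ++ stB.1 ++ pvTail stA.2 stB.2)
  ∧ (stA.2 = true → stB.2 = [])
  ∧ (stB.2 ≠ [] → stA.2 = false)
  ∧ (stA.2 = false → stB.2 = [] → stB.1 = [] ∧ l = false)
  ∧ (stA.2 = true → l = true ∨ stB.1 ≠ [])
  ∧ (∀ t ∈ stB.1, t ≠ [] ∧ '_' ∉ t)
  ∧ '_' ∉ stB.2

theorem pvIsalnum_ne_underscore {ch : Char} (h : PySem.Chars.isalnum ch = true) : ch ≠ '_' := by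
  intro hc; subst hc; revert h; decide

theorem pvIsalnum_not_space {ch : Char} (h : PySem.Chars.isalnum ch = true) :
    PySem.Chars.isspace ch = false := by
  simp only [PySem.Chars.isalnum, PySem.Chars.isspace, PySem.Chars.isdigit, PySem.Chars.isalpha,
    PySem.Chars.isupper, PySem.Chars.islower, Bool.or_eq_true, Bool.and_eq_true,
    decide_eq_true_eq, Char.le_def, Bool.or_eq_false_iff, Bool.and_eq_false_iff,
    decide_eq_false_iff_not, not_le, UInt32.le_iff_toNat_le, Char.toNat] at *
  have h1 : ('A').val.toNat = 65 := rfl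
  have h2 : ('Z').val.toNat = 90 := rfl
  have h3 : ('a').val.toNat = 97 := rfl
  have h4 : ('z').val.toNat = 122 := rfl
  have h5 : ('0').val.toNat = 48 := rfl
  have h6 : ('9').val.toNat = 57 := rfl
  rw [h1,h2,h3,h4,h5,h6] at h
  omega

-- split() of the blanked string is exactly the tokenizer fold
theorem pvGo_eq (cs : List Char) (cur : List Char) (acc : List (List Char)) :
    PySem.Chars.split₀.go (cs.map pvBlank) cur acc =
      (let st := cs.foldl pvStepB (acc.reverse, cur.reverse)
       if st.2 ≠ [] then st.1 ++ [st.2] else st.1) := by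
  induction cs generalizing cur acc with
  | nil =>
    simp only [List.map_nil, List.foldl_nil, PySem.Chars.split₀.go]
    by_cases hc : cur = []
    · subst hc; simp
    · rw [if_neg (by simpa [List.isEmpty_iff] using hc), if_pos (by simpa using hc)]
      simp
  | cons c cs ih =>
    by_cases ha : PySem.Chars.isalnum c = true
    · have hb : pvBlank c = c := by simp [pvBlank, ha]
      have hs : PySem.Chars.isspace c = false := pvIsalnum_not_space ha
      simp only [List.map_cons, hb, PySem.Chars.split₀.go, hs, Bool.false_eq_true, if_false,
        List.foldl_cons]
      rw [ih (c :: cur) acc]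
      simp [pvStepB, ha]
    · have ha' : PySem.Chars.isalnum c = false := by simpa using ha
      have hb : pvBlank c = ' ' := by simp [pvBlank, ha']
      have hs : PySem.Chars.isspace ' ' = true := by decide
      by_cases hc : cur = []
      · subst hc
        simp only [List.map_cons, hb, PySem.Chars.split₀.go, hs, if_true, List.isEmpty_nil,
          List.foldl_cons]
        rw [ih [] acc]
        simp [pvStepB, ha']
      · simp only [List.map_cons, hb, PySem.Chars.split₀.go, hs, if_true, List.foldl_cons]
        rw [if_neg (by simpa [List.isEmpty_iff] using hc), ih [] (cur.reverse :: acc)]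
        simp [pvStepB, ha', hc]

theorem pvSplit_eq (cs : List Char) :
    PySem.Chars.split₀ (cs.map pvBlank) =
      (let st := cs.foldl pvStepB ([], [])
       if st.2 ≠ [] then st.1 ++ [st.2] else st.1) := by
  have := pvGo_eq cs [] []
  simpa [PySem.Chars.split₀] using this

theorem pvJoin_snoc (xs : List (List Char)) (t : List Char) (h : xs ≠ []) :
    PySem.Chars.join ['_'] (xs ++ [t]) = PySem.Chars.join ['_'] xs ++ '_' :: t := by
  induction xs with
  | nil => exact absurd rfl h
  | cons x xs ih =>
    cases xs with
    | nil => simp [PySem.Chars.join_cons_cons, PySem.Chars.join_singleton]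
    | cons y ys =>
      have := ih (by simp)
      simp only [List.cons_append, PySem.Chars.join_cons_cons, List.cons_append] at *
      rw [this]; simp

theorem pvJoin_snoc_append (P : List (List Char)) (t a : List Char) :
    PySem.Chars.join ['_'] (P ++ [t ++ a]) = PySem.Chars.join ['_'] (P ++ [t]) ++ a := by
  cases P with
  | nil => simp [PySem.Chars.join_singleton]
  | cons x xs =>
    rw [pvJoin_snoc _ _ (by simp), pvJoin_snoc _ _ (by simp)]; simp

theorem pvLink_step (l : Bool) (stA : List Char × Bool) (stB : List (List Char) × List Char)
    (ch : Char) (h : pvLink l stA stB) :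
    ∃ l', pvLink l' (pvStepA stA ch) (pvStepB stB ch) := by
  obtain ⟨out, prev⟩ := stA
  obtain ⟨toks, cur⟩ := stB
  obtain ⟨h1, h2, h3, h4, h5, h6, h7⟩ := h
  simp only at h1 h2 h3 h4 h5 h6 h7
  by_cases ha : PySem.Chars.isalnum ch = true
  · -- alphanumeric character
    have eA : pvStepA (out, prev) ch = (out ++ [ch], false) := by simp [pvStepA, ha]
    have eB : pvStepB (toks, cur) ch = (toks, cur ++ [ch]) := by simp [pvStepB, ha]
    refine ⟨l, ?_⟩
    rw [eA, eB]
    refine ⟨?_, by simp, fun _ => rfl, by simp, by simp, h6, ?_⟩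
    · -- the out-string equation
      show out ++ [ch] = PySem.Chars.join ['_']
        ((cond l [[]] []) ++ toks ++ pvTail false (cur ++ [ch]))
      have ht : pvTail false (cur ++ [ch]) = [cur ++ [ch]] := by simp [pvTail]
      rw [ht, show (cond l [[]] [] : List (List Char)) ++ toks ++ [cur ++ [ch]]
            = ((cond l [[]] [] : List (List Char)) ++ toks) ++ [cur ++ [ch]] by simp,
         pvJoin_snoc_append]
      by_cases hc : cur = []
      · subst hc
        by_cases hp : prev = true
        · subst hp
          simp only [pvTail, ne_eq, not_true_eq_false, if_false, reduceIte] at h1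
          rw [h1]
        · have hp' : prev = false := by simpa using hp
          subst hp'
          obtain ⟨ht', hl⟩ := h4 rfl rfl
          subst ht'; subst hl
          simp [pvTail] at h1
          simp [h1, PySem.Chars.join_singleton]
      · have hp : prev = false := h3 hc
        subst hp
        simp only [pvTail, ne_eq, hc, not_false_eq_true, if_true] at h1
        rw [h1]
    · -- '_' not in cur ++ [ch]
      simp only [List.mem_append, List.mem_singleton]
      rintro (hm | hm)
      · exact h7 hm
      · exact pvIsalnum_ne_underscore ha hm.symm
  · -- non-alphanumeric character
    have ha' : PySem.Chars.isalnum ch = false := by simpa using ha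
    by_cases hp : prev = true
    · -- A unchanged; cur = [] so the tokenizer is unchanged
      have hc := h2 hp
      subst hc; subst hp
      have eA : pvStepA (out, true) ch = (out, true) := by simp [pvStepA, ha']
      have eB : pvStepB (toks, ([] : List Char)) ch = (toks, []) := by simp [pvStepB, ha']
      exact ⟨l, by rw [eA, eB]; exact ⟨h1, h2, h3, h4, h5, h6, h7⟩⟩
    · have hp' : prev = false := by simpa using hp
      subst hp'
      have eA : pvStepA (out, false) ch = (out ++ ['_'], true) := by simp [pvStepA, ha']
      by_cases hc : cur = []
      · -- start state: emit a leading '_'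
        obtain ⟨ht, hl⟩ := h4 rfl hc
        subst ht; subst hl; subst hc
        have eB : pvStepB (([] : List (List Char)), ([] : List Char)) ch = ([], []) := by
          simp [pvStepB, ha']
        refine ⟨true, ?_⟩
        rw [eA, eB]
        simp [pvTail] at h1
        subst h1
        refine ⟨?_, by simp, by simp, by simp, fun _ => Or.inl rfl, by simp, by simp⟩
        show [] ++ ['_'] = PySem.Chars.join ['_'] ((cond true [[]] []) ++ [] ++ pvTail true [])
        simp [pvTail, PySem.Chars.join_cons_cons, PySem.Chars.join_singleton]
      · -- flush cur and emit a separator '_'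
        have eB : pvStepB (toks, cur) ch = (toks ++ [cur], []) := by simp [pvStepB, ha', hc]
        refine ⟨l, ?_⟩
        rw [eA, eB]
        refine ⟨?_, fun _ => rfl, by simp, by simp, fun _ => Or.inr (by simp), ?_, by simp⟩
        · show out ++ ['_'] = PySem.Chars.join ['_']
            ((cond l [[]] []) ++ (toks ++ [cur]) ++ pvTail true [])
          have ht : pvTail true ([] : List Char) = [[]] := by simp [pvTail]
          rw [ht, show (cond l [[]] [] : List (List Char)) ++ (toks ++ [cur]) ++ [([] : List Char)]
              = ((cond l [[]] [] : List (List Char)) ++ toks ++ [cur]) ++ [([] : List Char)] by simp,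
             pvJoin_snoc _ _ (by simp)]
          simp only [pvTail, ne_eq, hc, not_false_eq_true, if_true] at h1
          rw [h1]
        · intro t hm
          rcases List.mem_append.1 hm with hm | hm
          · exact h6 t hm
          · simp only [List.mem_singleton] at hm; subst hm; exact ⟨hc, h7⟩

theorem pvLink_fold (cs : List Char) (l : Bool) (stA : List Char × Bool)
    (stB : List (List Char) × List Char) (h : pvLink l stA stB) :
    ∃ l', pvLink l' (cs.foldl pvStepA stA) (cs.foldl pvStepB stB) := by
  induction cs generalizing l stA stB with
  | nil => exact ⟨l, h⟩
  | cons c cs ih =>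
    obtain ⟨l', h'⟩ := pvLink_step l stA stB c h
    exact ih l' _ _ h'

-- the membership test used by strip('_')
theorem pvContains_eq (c : Char) : (['_'].contains c) = decide (c = '_') := by
  rcases Decidable.em (c = '_') with h | h
  · subst h; decide
  · simp only [List.contains_cons, List.contains_nil, Bool.or_false]
    rw [decide_eq_false h, beq_eq_false_iff_ne]
    exact h

theorem pvDrop_join (ts : List (List Char)) (suf : List Char)
    (hne : ts ≠ []) (hgood : ∀ t ∈ ts, t ≠ [] ∧ '_' ∉ t) :
    List.dropWhile (fun c => (['_'].contains c))
      (PySem.Chars.join ['_'] ts ++ suf) = PySem.Chars.join ['_'] ts ++ suf := by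
  obtain ⟨t, ts', rfl⟩ : ∃ t ts', ts = t :: ts' := by
    cases ts with
    | nil => exact absurd rfl hne
    | cons a b => exact ⟨a, b, rfl⟩
  obtain ⟨c, t', rfl⟩ : ∃ c t', t = c :: t' := by
    cases t with
    | nil => exact absurd rfl (hgood _ (by simp)).1
    | cons a b => exact ⟨a, b, rfl⟩
  have hc : c ≠ '_' := by
    intro hh
    exact (hgood (c :: t') (by simp)).2 (by rw [hh]; exact List.mem_cons_self)
  have hpc : ¬ ((['_'].contains c) = true) := by
    rw [pvContains_eq]; simpa using hc
  cases ts' with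
  | nil =>
    rw [PySem.Chars.join_singleton]
    show List.dropWhile _ (c :: (t' ++ suf)) = c :: (t' ++ suf)
    rw [List.dropWhile_cons_of_neg hpc]
  | cons u us =>
    rw [PySem.Chars.join_cons_cons]
    simp only [List.cons_append, List.append_assoc]
    rw [List.dropWhile_cons_of_neg hpc]

-- reversing a join reverses the tokens
theorem pvJoin_reverse (ts : List (List Char)) :
    (PySem.Chars.join ['_'] ts).reverse
      = PySem.Chars.join ['_'] ((ts.map List.reverse).reverse) := by
  induction ts with
  | nil => simp [PySem.Chars.join_nil]
  | cons t ts ih =>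
    cases ts with
    | nil => simp [PySem.Chars.join_singleton]
    | cons u us =>
      rw [PySem.Chars.join_cons_cons]
      simp only [List.map_cons, List.reverse_cons]
      rw [pvJoin_snoc _ _ (by simp)]
      simp only [List.reverse_append, List.reverse_cons]
      rw [ih]
      simp [List.map_cons, List.reverse_cons]

theorem pvStrip_join (a b : Bool) (ts : List (List Char))
    (h : ∀ t ∈ ts, t ≠ [] ∧ '_' ∉ t) :
    PySem.Chars.stripChars
      (PySem.Chars.join ['_'] ((cond a [[]] []) ++ ts ++ (cond b [[]] []))) ['_']
    = PySem.Chars.join ['_'] ts := by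
  cases ts with
  | nil =>
    cases a <;> cases b <;> decide
  | cons t ts' =>
    set J := PySem.Chars.join ['_'] (t :: ts') with hJ
    -- the wrapped join is optU ++ J ++ optU'
    have hwrap : PySem.Chars.join ['_'] ((cond a [[]] []) ++ (t :: ts') ++ (cond b [[]] []))
        = (cond a ['_'] []) ++ J ++ (cond b ['_'] []) := by
      cases a <;> cases b
      · simp [hJ]
      · -- a = false, b = true
        show PySem.Chars.join ['_'] ((t :: ts') ++ [[]]) = J ++ ['_']
        rw [pvJoin_snoc _ _ (by simp)]
      · -- a = true, b = false
        simp only [cond, List.append_nil]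
        show PySem.Chars.join ['_'] ([] :: t :: ts') = ('_' :: J : List Char)
        rw [PySem.Chars.join_cons_cons]
        rfl
      · show PySem.Chars.join ['_'] ([] :: ((t :: ts') ++ [[]])) = '_' :: (J ++ ['_'])
        obtain ⟨u, us, he⟩ : ∃ u us, (t :: ts') ++ [[]] = u :: us :=
          ⟨t, ts' ++ [[]], by simp⟩
        rw [he, PySem.Chars.join_cons_cons, ← he, pvJoin_snoc _ _ (by simp)]
        rfl
    rw [hwrap]
    unfold PySem.Chars.stripChars
    simp only []
    -- the left strip removes at most the leading '_'
    have hl : List.dropWhile (fun c => (['_'].contains c))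
        ((cond a ['_'] []) ++ J ++ (cond b ['_'] []))
        = J ++ (cond b ['_'] []) := by
      cases a
      · simpa using pvDrop_join (t :: ts') (cond b ['_'] []) (by simp) h
      · show List.dropWhile _ ('_' :: (J ++ cond b ['_'] [])) = _
        rw [List.dropWhile_cons_of_pos (by rw [pvContains_eq]; simp)]
        simpa using pvDrop_join (t :: ts') (cond b ['_'] []) (by simp) h
    rw [hl]
    -- the right strip removes at most the trailing '_'
    have hgood' : ∀ u ∈ (List.map List.reverse (t :: ts')).reverse, u ≠ [] ∧ '_' ∉ u := by
      intro u hu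
      simp only [List.mem_reverse, List.mem_map] at hu
      obtain ⟨v, hv, rfl⟩ := hu
      exact ⟨by simpa using (h v hv).1, by simpa using (h v hv).2⟩
    have hd : List.dropWhile (fun c => (['_'].contains c)) J.reverse = J.reverse := by
      rw [hJ, pvJoin_reverse]
      simpa using pvDrop_join _ [] (by simp) hgood'
    cases b
    · simp only [cond, List.append_nil]
      rw [hd, List.reverse_reverse]
    · simp only [cond]
      rw [List.reverse_append]
      show (List.dropWhile _ ('_' :: J.reverse)).reverse = J
      rw [List.dropWhile_cons_of_pos (by rw [pvContains_eq]; simp), hd, List.reverse_reverse]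

theorem pvName_eq (stA : List Char × Bool) (stB : List (List Char) × List Char)
    (l : Bool) (hL : pvLink l stA stB) :
    PySem.Chars.stripChars stA.1 ['_']
      = PySem.Chars.join ['_'] (if stB.2 ≠ [] then stB.1 ++ [stB.2] else stB.1) := by
  obtain ⟨out, prev⟩ := stA
  obtain ⟨toks, cur⟩ := stB
  obtain ⟨h1, h2, h3, h4, h5, h6, h7⟩ := hL
  simp only at h1 h2 h3 h4 h5 h6 h7 ⊢
  by_cases hc : cur = []
  · subst hc
    simp only [ne_eq, not_true_eq_false, if_false]
    by_cases hp : prev = true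
    · subst hp
      have ht : pvTail true ([] : List Char) = cond true [[]] [] := by simp [pvTail]
      rw [ht] at h1
      rw [h1]
      exact pvStrip_join l true toks h6
    · have hp' : prev = false := by simpa using hp
      subst hp'
      obtain ⟨ht, hl'⟩ := h4 rfl rfl
      subst ht; subst hl'
      simp [pvTail] at h1
      rw [h1]
      decide
  · have hp : prev = false := h3 hc
    subst hp
    simp only [ne_eq, hc, not_false_eq_true, if_true]
    have ht : pvTail false cur = [cur] := by simp [pvTail, hc]
    rw [ht] at h1
    have h1' : out = PySem.Chars.join ['_']
        ((cond l [[]] []) ++ (toks ++ [cur]) ++ (cond false [[]] [])) := by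
      rw [h1]; simp
    rw [h1']
    refine pvStrip_join l false (toks ++ [cur]) ?_
    intro t hm
    rcases List.mem_append.1 hm with hm | hm
    · exact h6 t hm
    · simp only [List.mem_singleton] at hm; subst hm; exact ⟨hc, h7⟩


-- ===== VERDICT (by name: the statement is the Claim_ definition above) =====
theorem enum_name_spec : Claim_equal_enum_name := by
  intro label _
  unfold Spec_enum_name
  by_cases hlab : label = ""
  · subst hlab; rfl
  · obtain ⟨l, hL⟩ := pvLink_fold (PySem.Str.lower label).toList false ([], false) ([], [])
      ⟨by simp [pvTail, PySem.Chars.join_nil], by simp, by simp, by simp, by simp, by simp,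
        by simp⟩
    have hname := pvName_eq _ _ l hL
    have hsplit := pvSplit_eq (PySem.Str.lower label).toList
    show (if label = "" then "unspecified" else
      let st := (PySem.Str.lower label).toList.foldl pvStepA ([], false)
      let name := PySem.Chars.stripChars st.1 ['_']
      if name = [] then "unspecified" else
      let name := if PySem.Chars.isdigit name.headI then '_' :: name else name
      String.ofList name)
      = (let spaced := (PySem.Str.lower label).toList.map pvBlank
         let name := PySem.Chars.join ['_'] (PySem.Chars.split₀ spaced)
         if name = [] then "unspecified" else
         if PySem.Chars.isdigit name.headI then String.ofList ('_' :: name)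
         else String.ofList name)
    rw [if_neg hlab]
    simp only [hsplit]
    rw [hname]
    split_ifs <;> rfl
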